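-- pv_equiv track=rewrite | github.com/wizard339/education | courses/intro_to_algo_MIT/birthday_match.py | birthday_match
-- ===== SOURCE A (Python) =====
-- class StaticArray:
--     def __init__(self, n):
--         self.data = [None] * n
--
--     def get_at(self, index):
--         if not (0 <= index < len(self.data)):
--             raise IndexError
--         return self.data[index]
--
--     def set_at(self, index, value):
--         if not (0 <= index < len(self.data)):
--             raise IndexError
--         self.data[index] = value
--
-- def birthday_match(students):
--     """
--     Find a pair of students with the same birthday
--     Input:  tuple of student (name, bday) tuples
--     Output: tuple of student names or None
--     """
--     n = len(students)                            # O(1)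
--     record = StaticArray(n)                      # O(n)
--     for k in range(n):                           # n
--         (name1, bday1) = students[k]             # O(1)
--         # return pair if bdayl in record
--         for i in range(k):                       # k
--             (name2, bday2) = record.get_at(i)    # O(1)
--             if bday1 == bday2:                   # O(1)
--                 return (name1, name2)            # O(1)
--         record.set_at(k, (name1, bday1))         # O(1)
--     return None                                  # O(1)
-- ===== SOURCE B (Python) =====
-- def birthday_match(students):
--     """
--     Find a pair of students with the same birthday
--     Input:  tuple of student (name, bday) tuples
--     Output: tuple of student names or None
--     """
--     seen = {}
--     for name, bday in students:
--         if bday in seen: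
--             return (name, seen[bday])
--         seen[bday] = name
--     return None
-- ===== Notes on version B (the rewrite author's own statement) =====
-- stated objective: faster
-- what changed: Replaces the quadratic inner scan over previously recorded students with a single pass keeping a dict from birthday to first name, checked on each insert.
import Mathlib
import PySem

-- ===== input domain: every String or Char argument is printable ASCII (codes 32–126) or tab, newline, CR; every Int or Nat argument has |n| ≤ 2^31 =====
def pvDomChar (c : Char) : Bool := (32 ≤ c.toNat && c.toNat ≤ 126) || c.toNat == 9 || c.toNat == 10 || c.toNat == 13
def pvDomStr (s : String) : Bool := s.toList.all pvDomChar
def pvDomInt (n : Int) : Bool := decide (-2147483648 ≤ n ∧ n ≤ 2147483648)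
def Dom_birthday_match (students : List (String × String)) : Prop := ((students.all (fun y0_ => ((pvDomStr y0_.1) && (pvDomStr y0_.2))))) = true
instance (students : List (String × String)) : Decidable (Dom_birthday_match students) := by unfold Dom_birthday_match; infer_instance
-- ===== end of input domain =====

-- B replaces A's quadratic scan of previously seen students with a one-pass dict from birthday to first name (faster).


-- ===== PORT A =====
-- inner loop: scan record (get_at i for i in range(k)) for a matching birthday
def pvAInner (bday1 : String) : List (String × String) → Option String
  | [] => none
  | (name2, bday2) :: rest => if bday1 == bday2 then some name2 else pvAInner bday1 rest

-- outer loop: record holds the first k students (set_at k appends at position k)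
def pvALoop (record : List (String × String)) : List (String × String) → Option (String × String)
  | [] => none
  | (name1, bday1) :: rest =>
    match pvAInner bday1 record with
    | some name2 => some (name1, name2)
    | none => pvALoop (record ++ [(name1, bday1)]) rest

def birthday_match (students : List (String × String)) : Option (String × String) :=
  pvALoop [] students

-- ===== PORT B =====
def pvBLoop (seen : PySem.Dict String String) : List (String × String) → Option (String × String)
  | [] => none
  | (name, bday) :: rest =>
    match seen.get? bday with
    | some prev => some (name, prev)
    | none => pvBLoop (seen.insert bday name) rest

def birthday_match_alt (students : List (String × String)) : Option (String × String) :=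
  pvBLoop PySem.Dict.empty students

-- ===== PRECONDITION & SPEC =====
def Spec_birthday_match (students : List (String × String)) (out : Option (String × String)) : Prop := out = birthday_match_alt students
instance (students : List (String × String)) (out : Option (String × String)) : Decidable (Spec_birthday_match students out) := by unfold Spec_birthday_match; infer_instance

-- ===== CLAIM (what is proved, stated in full; the proofs are below) =====
def Claim_equal_birthday_match : Prop := ∀ (students : List (String × String)), Dom_birthday_match students → Spec_birthday_match students (birthday_match students)

-- ===== LEMMAS AND PROOFS =====

-- ===== VERDICT (by name: the statement is the Claim_ definition above) =====
theorem pvAInner_append (b name1 bday1 : String) (record : List (String × String)) :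
    pvAInner b (record ++ [(name1, bday1)]) =
      match pvAInner b record with
      | some x => some x
      | none => if b == bday1 then some name1 else none := by
  induction record with
  | nil => rfl
  | cons p tl ih =>
    obtain ⟨n2, b2⟩ := p
    by_cases hb : b == b2 <;> simp [pvAInner, hb, ih]

theorem pvInner_get (record : List (String × String)) (d : PySem.Dict String String)
    (h : ∀ b, d.get? b = pvAInner b record) (name1 bday1 : String)
    (hnone : pvAInner bday1 record = none) (b : String) :
    (d.insert bday1 name1).get? b = pvAInner b (record ++ [(name1, bday1)]) := by
  rw [PySem.Dict.get?_insert, h b, pvAInner_append]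
  by_cases hb : b = bday1
  · subst hb; rw [hnone]; simp
  · cases pvAInner b record <;> simp [hb]

theorem pvLoop_eq (rest : List (String × String)) (record : List (String × String))
    (d : PySem.Dict String String) (h : ∀ b, d.get? b = pvAInner b record) :
    pvALoop record rest = pvBLoop d rest := by
  induction rest generalizing record d with
  | nil => rfl
  | cons p tl ih =>
    obtain ⟨name1, bday1⟩ := p
    simp only [pvALoop, pvBLoop, h bday1]
    cases hm : pvAInner bday1 record with
    | some name2 => rfl
    | none =>
      exact ih (record ++ [(name1, bday1)]) (d.insert bday1 name1)
        (pvInner_get record d h name1 bday1 hm)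

theorem birthday_match_spec : Claim_equal_birthday_match := by
  intro students _
  unfold Spec_birthday_match birthday_match birthday_match_alt
  exact pvLoop_eq students [] PySem.Dict.empty (fun b => by simp [pvAInner, PySem.Dict.empty, PySem.Dict.get?])
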